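-- pv_equiv track=rewrite | github.com/Damisaf/generala_python | enunciado.py | hizo_generala
-- ===== SOURCE A (Python) =====
-- def hizo_generala(dados):
--     la_hizo = True
--     if len(dados) < 5:
--         la_hizo = False
--         return(la_hizo)
--     for i in range(4):
--         if dados[i] != dados[i+1]:
--             la_hizo = False
--             break
--     return(la_hizo)
-- ===== SOURCE B (Python) =====
-- def hizo_generala(dados):
--     if len(dados) < 5:
--         return False
--     ventana = dados[:5]
--     return min(ventana) == max(ventana)
-- ===== Notes on version B (the rewrite author's own statement) =====
-- stated objective: alternative
-- what changed: Replaces the adjacent-pair scanning loop with break by two extremal passes: the first five dice are all equal iff the minimum of that window equals its maximum.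
import Mathlib
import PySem

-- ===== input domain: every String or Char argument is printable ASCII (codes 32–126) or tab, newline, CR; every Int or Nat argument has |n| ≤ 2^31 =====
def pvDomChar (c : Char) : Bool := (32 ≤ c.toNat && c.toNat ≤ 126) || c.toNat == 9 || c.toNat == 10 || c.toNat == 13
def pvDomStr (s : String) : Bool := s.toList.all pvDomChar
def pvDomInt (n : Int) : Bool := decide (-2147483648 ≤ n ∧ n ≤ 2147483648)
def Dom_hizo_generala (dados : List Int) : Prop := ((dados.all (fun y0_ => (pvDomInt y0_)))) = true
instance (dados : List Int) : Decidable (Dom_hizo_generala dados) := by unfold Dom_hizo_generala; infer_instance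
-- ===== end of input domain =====

-- B replaces A's adjacent-pair loop with two extremal passes: min of the first-five window equals its max.

-- ===== PORT A =====
-- the 'for i in range(4): if dados[i] != dados[i+1]: la_hizo = False; break' loop
def hizoLoopA (dados : List Int) : List Int → Bool
  | [] => true
  | i :: rest =>
      if PySem.List.pyGetD dados i 0 ≠ PySem.List.pyGetD dados (i + 1) 0 then false
      else hizoLoopA dados rest

def hizo_generala (dados : List Int) : Bool :=
  if dados.length < 5 then false
  else hizoLoopA dados (PySem.List.pyRange 0 4 1)

-- ===== PORT B =====
def hizo_generala_alt (dados : List Int) : Bool :=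
  if dados.length < 5 then false
  else
    let ventana := PySem.List.slice dados none (some 5)
    PySem.List.min? ventana (fun x => x) == PySem.List.max? ventana (fun x => x)

-- ===== PRECONDITION & SPEC =====
def Spec_hizo_generala (dados : List Int) (out : Bool) : Prop := out = hizo_generala_alt dados
instance (dados : List Int) (out : Bool) : Decidable (Spec_hizo_generala dados out) := by unfold Spec_hizo_generala; infer_instance

-- ===== CLAIM (what is proved, stated in full; the proofs are below) =====
def Claim_equal_hizo_generala : Prop := ∀ (dados : List Int), Dom_hizo_generala dados → Spec_hizo_generala dados (hizo_generala dados)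

-- ===== LEMMAS AND PROOFS =====
theorem hizo_eq (a b c d e : Int) (rest : List Int) :
    hizo_generala (a :: b :: c :: d :: e :: rest) = hizo_generala_alt (a :: b :: c :: d :: e :: rest) := by
  have hlen : ¬ (a :: b :: c :: d :: e :: rest).length < 5 := by
    simp [List.length]
  simp only [hizo_generala, hizo_generala_alt, if_neg hlen]
  have hslice : PySem.List.slice (a :: b :: c :: d :: e :: rest) none (some 5) = [a, b, c, d, e] := by
    rw [show (5 : Int) = ((5 : Nat) : Int) by norm_num, PySem.List.slice_to_natCast]
    rfl
  have hrange : PySem.List.pyRange 0 4 1 = [0, 1, 2, 3] := by decide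
  rw [hslice, hrange]
  rw [PySem.List.min?_id_cons, PySem.List.max?_id_cons]
  apply Bool.eq_iff_iff.mpr
  simp [hizoLoopA, pysem, List.foldl]
  constructor
  · rintro ⟨rfl, rfl, rfl, rfl⟩; simp
  · intro h; omega

-- ===== VERDICT (by name: the statement is the Claim_ definition above) =====
theorem hizo_generala_spec : Claim_equal_hizo_generala := by
  intro dados _
  unfold Spec_hizo_generala
  match dados with
  | [] => decide
  | [a] => simp [hizo_generala, hizo_generala_alt]
  | [a, b] => simp [hizo_generala, hizo_generala_alt]
  | [a, b, c] => simp [hizo_generala, hizo_generala_alt]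
  | [a, b, c, d] => simp [hizo_generala, hizo_generala_alt]
  | a :: b :: c :: d :: e :: rest => exact hizo_eq a b c d e rest
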